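-- pv_equiv track=rewrite | github.com/nik-hil/new-lovalable-clone | simple_tests.py | validate_generated_files
-- ===== SOURCE A (Python) =====
-- def validate_generated_files(files: dict, is_backend_required: bool) -> tuple[bool, list]:
--     """
--     Validate that all required files were generated
--     """
--     missing_files = []
--
--     # Check for essential frontend files
--     has_html = any('html' in filename.lower() for filename in files.keys())
--     has_css = any('css' in filename.lower() for filename in files.keys())
--
--     if not has_html:
--         missing_files.append('HTML file')
--     if not has_css:
--         missing_files.append('CSS file')
--
--     # Only check for backend files if explicitly required
--     if is_backend_required:
--         has_flask = any(
--             'app.py' in filename or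
--             ('flask' in content.lower() and 'from flask import' in content)
--             for filename, content in files.items()
--         )
--         has_schema = any('schema.sql' in filename for filename in files.keys())
--         has_database = any('database.py' in filename for filename in files.keys())
--
--         if not has_flask:
--             missing_files.append('Flask backend (app.py)')
--         if not (has_schema or has_database):
--             missing_files.append('Database files (database.py or schema.sql)')
--
--     return len(missing_files) == 0, missing_files
-- ===== SOURCE B (Python) =====
-- def validate_generated_files(files: dict, is_backend_required: bool) -> tuple[bool, list]:
--     """Single-pass validation: one traversal of files.items() sets all flags."""
--     has_html = has_css = has_flask = has_schema = has_database = False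
--     for filename, content in files.items():
--         low = filename.lower()
--         if 'html' in low:
--             has_html = True
--         if 'css' in low:
--             has_css = True
--         if 'app.py' in filename or ('flask' in content.lower() and 'from flask import' in content):
--             has_flask = True
--         if 'schema.sql' in filename:
--             has_schema = True
--         if 'database.py' in filename:
--             has_database = True
--     missing_files = []
--     if not has_html:
--         missing_files.append('HTML file')
--     if not has_css:
--         missing_files.append('CSS file')
--     if is_backend_required:
--         if not has_flask:
--             missing_files.append('Flask backend (app.py)')
--         if not (has_schema or has_database):
--             missing_files.append('Database files (database.py or schema.sql)')
--     return not missing_files, missing_files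
-- ===== Notes on version B (the rewrite author's own statement) =====
-- stated objective: alternative
-- what changed: Five separate any(...) scans over the dict are fused into one loop over files.items() that maintains all five flags, with the missing-file list assembled afterwards from the flags.
import Mathlib
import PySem

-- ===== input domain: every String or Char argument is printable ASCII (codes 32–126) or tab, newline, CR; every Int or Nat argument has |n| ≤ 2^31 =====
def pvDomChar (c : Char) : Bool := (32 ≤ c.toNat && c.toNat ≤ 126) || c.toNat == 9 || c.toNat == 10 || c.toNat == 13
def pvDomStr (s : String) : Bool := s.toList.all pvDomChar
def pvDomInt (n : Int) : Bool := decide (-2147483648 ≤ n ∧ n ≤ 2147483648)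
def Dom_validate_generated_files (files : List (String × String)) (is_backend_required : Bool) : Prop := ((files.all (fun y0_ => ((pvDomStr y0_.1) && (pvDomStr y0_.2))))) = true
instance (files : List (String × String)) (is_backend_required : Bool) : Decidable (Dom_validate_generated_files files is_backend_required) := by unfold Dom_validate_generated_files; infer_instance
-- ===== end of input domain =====

-- ===== PORT A =====
-- B fuses A's five any(...) scans into one traversal maintaining all five flags (objective: alternative decomposition).
def validate_generated_files (files : List (String × String)) (is_backend_required : Bool) : Bool × List String :=
  let missing_files : List String := []
  let has_html := files.any (fun p => PySem.Str.isIn "html" (PySem.Str.lower p.1))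
  let has_css := files.any (fun p => PySem.Str.isIn "css" (PySem.Str.lower p.1))
  let missing_files := if !has_html then missing_files ++ ["HTML file"] else missing_files
  let missing_files := if !has_css then missing_files ++ ["CSS file"] else missing_files
  let missing_files :=
    if is_backend_required then
      let has_flask := files.any (fun p =>
        PySem.Str.isIn "app.py" p.1 ||
        (PySem.Str.isIn "flask" (PySem.Str.lower p.2) && PySem.Str.isIn "from flask import" p.2))
      let has_schema := files.any (fun p => PySem.Str.isIn "schema.sql" p.1)
      let has_database := files.any (fun p => PySem.Str.isIn "database.py" p.1)
      let missing_files := if !has_flask then missing_files ++ ["Flask backend (app.py)"] else missing_files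
      if !(has_schema || has_database) then
        missing_files ++ ["Database files (database.py or schema.sql)"]
      else missing_files
    else missing_files
  (missing_files.length == 0, missing_files)

-- ===== PORT B =====
def validate_generated_files_alt (files : List (String × String)) (is_backend_required : Bool) : Bool × List String :=
  let flags := files.foldl
    (fun (s : Bool × Bool × Bool × Bool × Bool) p =>
      let low := PySem.Str.lower p.1
      ( s.1 || PySem.Str.isIn "html" low,
        s.2.1 || PySem.Str.isIn "css" low,
        s.2.2.1 || (PySem.Str.isIn "app.py" p.1 ||
          (PySem.Str.isIn "flask" (PySem.Str.lower p.2) && PySem.Str.isIn "from flask import" p.2)),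
        s.2.2.2.1 || PySem.Str.isIn "schema.sql" p.1,
        s.2.2.2.2 || PySem.Str.isIn "database.py" p.1 ))
    (false, false, false, false, false)
  let missing_files : List String := []
  let missing_files := if !flags.1 then missing_files ++ ["HTML file"] else missing_files
  let missing_files := if !flags.2.1 then missing_files ++ ["CSS file"] else missing_files
  let missing_files :=
    if is_backend_required then
      let missing_files := if !flags.2.2.1 then missing_files ++ ["Flask backend (app.py)"] else missing_files
      if !(flags.2.2.2.1 || flags.2.2.2.2) then
        missing_files ++ ["Database files (database.py or schema.sql)"]
      else missing_files
    else missing_files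
  (missing_files.isEmpty, missing_files)

-- ===== PRECONDITION & SPEC =====
def Spec_validate_generated_files (files : List (String × String)) (is_backend_required : Bool) (out : Bool × List String) : Prop := out = validate_generated_files_alt files is_backend_required
instance (files : List (String × String)) (is_backend_required : Bool) (out : Bool × List String) : Decidable (Spec_validate_generated_files files is_backend_required out) := by unfold Spec_validate_generated_files; infer_instance

-- ===== CLAIM (what is proved, stated in full; the proofs are below) =====
def Claim_equal_validate_generated_files : Prop := ∀ (files : List (String × String)) (is_backend_required : Bool), Dom_validate_generated_files files is_backend_required → Spec_validate_generated_files files is_backend_required (validate_generated_files files is_backend_required)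

-- ===== LEMMAS AND PROOFS =====

-- The fused fold computes the five any-scans, each or-ed with its initial flag.
theorem flags_foldl (files : List (String × String)) (a b c d e : Bool) :
    files.foldl
      (fun (s : Bool × Bool × Bool × Bool × Bool) p =>
        let low := PySem.Str.lower p.1
        ( s.1 || PySem.Str.isIn "html" low,
          s.2.1 || PySem.Str.isIn "css" low,
          s.2.2.1 || (PySem.Str.isIn "app.py" p.1 ||
            (PySem.Str.isIn "flask" (PySem.Str.lower p.2) && PySem.Str.isIn "from flask import" p.2)),
          s.2.2.2.1 || PySem.Str.isIn "schema.sql" p.1,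
          s.2.2.2.2 || PySem.Str.isIn "database.py" p.1 ))
      (a, b, c, d, e)
    = ( a || files.any (fun p => PySem.Str.isIn "html" (PySem.Str.lower p.1)),
        b || files.any (fun p => PySem.Str.isIn "css" (PySem.Str.lower p.1)),
        c || files.any (fun p =>
          PySem.Str.isIn "app.py" p.1 ||
          (PySem.Str.isIn "flask" (PySem.Str.lower p.2) && PySem.Str.isIn "from flask import" p.2)),
        d || files.any (fun p => PySem.Str.isIn "schema.sql" p.1),
        e || files.any (fun p => PySem.Str.isIn "database.py" p.1) ) := by
  induction files generalizing a b c d e with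
  | nil => simp
  | cons x xs ih => simp only [List.foldl_cons, List.any_cons]; rw [ih]; simp [Bool.or_assoc]

-- ===== VERDICT (by name: the statement is the Claim_ definition above) =====
theorem validate_generated_files_spec : Claim_equal_validate_generated_files := by
  intro files is_backend_required _
  unfold Spec_validate_generated_files validate_generated_files validate_generated_files_alt
  rw [flags_foldl]
  cases files.any (fun p => PySem.Str.isIn "html" (PySem.Str.lower p.1)) <;>
  cases files.any (fun p => PySem.Str.isIn "css" (PySem.Str.lower p.1)) <;>
  cases files.any (fun p =>
      PySem.Str.isIn "app.py" p.1 ||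
      (PySem.Str.isIn "flask" (PySem.Str.lower p.2) && PySem.Str.isIn "from flask import" p.2)) <;>
  cases files.any (fun p => PySem.Str.isIn "schema.sql" p.1) <;>
  cases files.any (fun p => PySem.Str.isIn "database.py" p.1) <;>
  cases is_backend_required <;> rfl
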